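-- pv_equiv track=rewrite | github.com/immunitastx/monkeybread | src/monkeybread/util/_neighbor_count.py | neighbor_count
-- ===== SOURCE A (Python) =====
-- from typing import Dict, Set
--
-- def neighbor_count(cell_to_neighbors: Dict[str, Set[str]], group1: Set[str], group2: Set[str]) -> int:
--     """Counts neighbors observed by :func:`monkeybread.calc.cell_neighbors`.
--
--     Sums the number of unique neighbor-pairs given the neighbor dictionary and a set of
--     of cells in each of the two groups.
--
--     Parameters
--     ----------
--     cell_to_neighbors
--         A dictionary mapping from cell indices to other cell indices, as returned by
--         :func:`monkeybread.calc.cell_neighbors`.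
--     group1
--         Cell indices corresponding to `group1`.
--     group2
--         Cell indices corresponding to `group2`.
--
--     Returns
--     -------
--     The number of unique neighbor-pairs found between a cell in `group1` and a cell
--     in `group2`.
--     """
--     # Sum number of g1-g2 neighbors, then subtract half of the double counting that occurs when cells
--     # are in both g1 and g2
--     counts = sum(
--         0
--         if k not in group1
--         else sum(v in group2 for v in values)
--         for k, values in cell_to_neighbors.items()
--     )
--     double_counted = sum(
--         sum(
--             k in group1 and k in group2 and v in group1 and v in group2
--             for v in values
--         )
--         for k, values in cell_to_neighbors.items()
--     )
--     return counts - int(0.5 * double_counted)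
-- ===== SOURCE B (Python) =====
-- def neighbor_count(cell_to_neighbors, group1, group2):
--     """Histogram algorithm: classify every directed edge by the (group-membership
--     mask of k, mask of v) pair into a 16-class histogram, then combine the four
--     relevant buckets with a closed-form expression."""
--     g1 = set(group1)
--     g2 = set(group2)
--     hist = {}
--     for k, values in cell_to_neighbors.items():
--         mk = (k in g1) + 2 * (k in g2)
--         for v in values:
--             key = (mk, (v in g1) + 2 * (v in g2))
--             hist[key] = hist.get(key, 0) + 1
--     counts = (hist.get((1, 2), 0) + hist.get((1, 3), 0)
--               + hist.get((3, 2), 0) + hist.get((3, 3), 0))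
--     return counts - hist.get((3, 3), 0) // 2
-- ===== Notes on version B (the rewrite author's own statement) =====
-- stated objective: alternative
-- what changed: Instead of A's two full scans with inline membership sums, B classifies each directed edge once by the (membership-mask(k), membership-mask(v)) pair into a 16-class histogram dictionary and then computes the answer by a closed-form combination of four buckets (counts = buckets (1,2)+(1,3)+(3,2)+(3,3), double = bucket (3,3)).
import Mathlib
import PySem

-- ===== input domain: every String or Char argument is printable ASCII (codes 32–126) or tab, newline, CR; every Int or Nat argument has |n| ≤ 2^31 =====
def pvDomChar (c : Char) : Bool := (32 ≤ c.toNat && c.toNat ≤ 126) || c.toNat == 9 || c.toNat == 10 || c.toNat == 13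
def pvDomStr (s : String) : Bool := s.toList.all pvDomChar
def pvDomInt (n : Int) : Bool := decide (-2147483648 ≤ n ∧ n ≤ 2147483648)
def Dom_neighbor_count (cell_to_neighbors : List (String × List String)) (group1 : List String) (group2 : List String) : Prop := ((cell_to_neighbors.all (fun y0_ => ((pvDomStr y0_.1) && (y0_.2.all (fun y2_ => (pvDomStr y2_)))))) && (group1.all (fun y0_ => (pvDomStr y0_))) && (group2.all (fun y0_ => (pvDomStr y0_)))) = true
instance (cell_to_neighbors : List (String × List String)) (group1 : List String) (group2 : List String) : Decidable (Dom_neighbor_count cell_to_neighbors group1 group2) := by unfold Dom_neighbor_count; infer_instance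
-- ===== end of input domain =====

-- B replaces A's two scans with inline membership sums by one histogram pass: every
-- directed edge is classified by its (mask k, mask v) membership-mask pair into a
-- dictionary, and the answer is a closed-form combination of four buckets (alternative).


-- ===== PORT A =====
-- int(0.5 * double_counted) is ported as floordiv by 2: double_counted is a
-- nonnegative sum of 0/1 terms, where 0.5 * d is exact and truncation = floor.
def neighbor_count (cell_to_neighbors : List (String × List String)) (group1 : List String) (group2 : List String) : Int :=
  let counts : Int := cell_to_neighbors.foldl
    (fun acc kv =>
      acc + (if kv.1 ∉ group1 then 0
             else kv.2.foldl (fun s v => s + (if v ∈ group2 then 1 else 0)) 0)) 0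
  let double_counted : Int := cell_to_neighbors.foldl
    (fun acc kv =>
      acc + kv.2.foldl
        (fun s v => s + (if kv.1 ∈ group1 ∧ kv.1 ∈ group2 ∧ v ∈ group1 ∧ v ∈ group2 then 1 else 0)) 0) 0
  counts - PySem.Int.floordiv double_counted 2

-- ===== PORT B =====
def neighbor_count_alt (cell_to_neighbors : List (String × List String)) (group1 : List String) (group2 : List String) : Int :=
  let g1 : PySem.Set String := PySem.Set.ofList group1
  let g2 : PySem.Set String := PySem.Set.ofList group2
  let hist : PySem.Dict (Int × Int) Int := cell_to_neighbors.foldl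
    (fun d kv =>
      let mk : Int := (if g1.contains kv.1 then 1 else 0) + 2 * (if g2.contains kv.1 then 1 else 0)
      kv.2.foldl
        (fun d v =>
          let key : Int × Int := (mk, (if g1.contains v then 1 else 0) + 2 * (if g2.contains v then 1 else 0))
          d.insert key (d.getD key 0 + 1)) d)
    PySem.Dict.empty
  let counts : Int := hist.getD (1, 2) 0 + hist.getD (1, 3) 0 + hist.getD (3, 2) 0 + hist.getD (3, 3) 0
  counts - PySem.Int.floordiv (hist.getD (3, 3) 0) 2

-- ===== PRECONDITION & SPEC =====
def Spec_neighbor_count (cell_to_neighbors : List (String × List String)) (group1 : List String) (group2 : List String) (out : Int) : Prop := out = neighbor_count_alt cell_to_neighbors group1 group2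
instance (cell_to_neighbors : List (String × List String)) (group1 : List String) (group2 : List String) (out : Int) : Decidable (Spec_neighbor_count cell_to_neighbors group1 group2 out) := by unfold Spec_neighbor_count; infer_instance

-- ===== CLAIM (what is proved, stated in full; the proofs are below) =====
def Claim_equal_neighbor_count : Prop := ∀ (cell_to_neighbors : List (String × List String)) (group1 : List String) (group2 : List String), Dom_neighbor_count cell_to_neighbors group1 group2 → Spec_neighbor_count cell_to_neighbors group1 group2 (neighbor_count cell_to_neighbors group1 group2)

-- ===== LEMMAS AND PROOFS =====

-- the membership mask of a node, and the class key of an edge (list-membership form)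
def ncMask (group1 group2 : List String) (x : String) : Int :=
  (if x ∈ group1 then 1 else 0) + 2 * (if x ∈ group2 then 1 else 0)

def ncKey (group1 group2 : List String) (k v : String) : Int × Int :=
  (ncMask group1 group2 k, ncMask group1 group2 v)

-- a 0/1 tally fold is init + countP
theorem foldl_if_count {α : Type} (p : α → Prop) [DecidablePred p] (vs : List α) (init : Int) :
    vs.foldl (fun s v => s + (if p v then 1 else 0)) init
      = init + ((vs.countP (fun v => decide (p v)) : Nat) : Int) := by
  induction vs generalizing init with
  | nil => simp
  | cons v vs ih =>
      simp only [List.foldl_cons, List.countP_cons, ih]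
      by_cases h : p v
      · simp [h]; ring
      · simp [h]

-- an 'accumulate f kv' fold is init + sum of f
theorem foldl_add_sum {α : Type} (f : α → Int) (c : List α) (init : Int) :
    c.foldl (fun a kv => a + f kv) init = init + (c.map f).sum := by
  induction c generalizing init with
  | nil => simp
  | cons kv c ih => simp [List.foldl_cons, ih]; ring

-- the inner histogram loop counts the key-images of the values
theorem inner_hist (f : String → Int × Int) (vs : List String) (d : PySem.Dict (Int × Int) Int)
    (key : Int × Int) :
    (vs.foldl (fun d v => d.insert (f v) (d.getD (f v) 0 + 1)) d).getD key 0
      = d.getD key 0 + ((vs.countP (fun v => f v == key) : Nat) : Int) := by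
  have h : vs.foldl (fun d v => d.insert (f v) (d.getD (f v) 0 + 1)) d
      = (vs.map f).foldl (fun d x => d.insert x (d.getD x 0 + 1)) d := by
    rw [List.foldl_map]
  rw [h, PySem.Dict.getD_foldl_insert_add_one]
  congr 1
  rw [List.count_eq_countP, List.countP_map]
  rfl

-- the whole histogram fold: each bucket holds the number of edges of its class
theorem hist_getD (group1 group2 : List String) (c : List (String × List String))
    (d : PySem.Dict (Int × Int) Int) (key : Int × Int) :
    (c.foldl
      (fun d kv =>
        let mk : Int := (if (PySem.Set.ofList group1).contains kv.1 then 1 else 0)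
            + 2 * (if (PySem.Set.ofList group2).contains kv.1 then 1 else 0)
        kv.2.foldl
          (fun d v =>
            let k' : Int × Int := (mk, (if (PySem.Set.ofList group1).contains v then 1 else 0)
                + 2 * (if (PySem.Set.ofList group2).contains v then 1 else 0))
            d.insert k' (d.getD k' 0 + 1)) d) d).getD key 0
      = d.getD key 0
        + (c.map (fun kv => ((kv.2.countP (fun v => ncKey group1 group2 kv.1 v == key) : Nat) : Int))).sum := by
  induction c generalizing d with
  | nil => simp
  | cons kv c ih =>
      simp only [List.foldl_cons, List.map_cons, List.sum_cons, ih]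
      have : ∀ v : String,
          ((( (if (PySem.Set.ofList group1).contains kv.1 then (1:Int) else 0)
              + 2 * (if (PySem.Set.ofList group2).contains kv.1 then 1 else 0)),
            ((if (PySem.Set.ofList group1).contains v then (1:Int) else 0)
              + 2 * (if (PySem.Set.ofList group2).contains v then 1 else 0)))
            = ncKey group1 group2 kv.1 v) := by
        intro v
        simp [ncKey, ncMask, PySem.Set.contains, PySem.Set.mem_ofList]
      rw [inner_hist (fun v =>
          (((if (PySem.Set.ofList group1).contains kv.1 then (1:Int) else 0)
              + 2 * (if (PySem.Set.ofList group2).contains kv.1 then 1 else 0)),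
            ((if (PySem.Set.ofList group1).contains v then (1:Int) else 0)
              + 2 * (if (PySem.Set.ofList group2).contains v then 1 else 0))))]
      have hc : ∀ vs : List String,
          vs.countP (fun v =>
            (((if (PySem.Set.ofList group1).contains kv.1 then (1:Int) else 0)
              + 2 * (if (PySem.Set.ofList group2).contains kv.1 then 1 else 0)),
             ((if (PySem.Set.ofList group1).contains v then (1:Int) else 0)
              + 2 * (if (PySem.Set.ofList group2).contains v then 1 else 0))) == key)
          = vs.countP (fun v => ncKey group1 group2 kv.1 v == key) := by
        intro vs; apply List.countP_congr; intro v _; rw [this v]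
      rw [hc]
      ring

-- splitting the g1→g2 count into the four histogram classes (per value list)
theorem countP_split (group1 group2 : List String) (k : String) (vs : List String) :
    vs.countP (fun v => decide (k ∈ group1 ∧ v ∈ group2))
      = vs.countP (fun v => ncKey group1 group2 k v == (1, 2))
        + vs.countP (fun v => ncKey group1 group2 k v == (1, 3))
        + vs.countP (fun v => ncKey group1 group2 k v == (3, 2))
        + vs.countP (fun v => ncKey group1 group2 k v == (3, 3)) := by
  induction vs with
  | nil => simp
  | cons v vs ih =>
      simp only [List.countP_cons, ih]
      by_cases h1 : k ∈ group1 <;> by_cases h2 : k ∈ group2 <;>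
        by_cases h3 : v ∈ group1 <;> by_cases h4 : v ∈ group2 <;>
        simp [ncKey, ncMask, h1, h2, h3, h4, Prod.ext_iff] <;> omega

-- splitting lifted to the sum over the whole dict
theorem sum_split (group1 group2 : List String) (c : List (String × List String)) :
    (c.map (fun kv => ((kv.2.countP (fun v => decide (kv.1 ∈ group1 ∧ v ∈ group2)) : Nat) : Int))).sum
      = (c.map (fun kv => ((kv.2.countP (fun v => ncKey group1 group2 kv.1 v == (1, 2)) : Nat) : Int))).sum
        + (c.map (fun kv => ((kv.2.countP (fun v => ncKey group1 group2 kv.1 v == (1, 3)) : Nat) : Int))).sum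
        + (c.map (fun kv => ((kv.2.countP (fun v => ncKey group1 group2 kv.1 v == (3, 2)) : Nat) : Int))).sum
        + (c.map (fun kv => ((kv.2.countP (fun v => ncKey group1 group2 kv.1 v == (3, 3)) : Nat) : Int))).sum := by
  induction c with
  | nil => simp
  | cons kv c ih =>
      simp only [List.map_cons, List.sum_cons, ih, countP_split group1 group2 kv.1 kv.2]
      push_cast
      ring

-- the double-count predicate is exactly class (3,3)
theorem countP_both (group1 group2 : List String) (k : String) (vs : List String) :
    vs.countP (fun v => decide (k ∈ group1 ∧ k ∈ group2 ∧ v ∈ group1 ∧ v ∈ group2))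
      = vs.countP (fun v => ncKey group1 group2 k v == (3, 3)) := by
  apply List.countP_congr
  intro v _
  by_cases h1 : k ∈ group1 <;> by_cases h2 : k ∈ group2 <;>
    by_cases h3 : v ∈ group1 <;> by_cases h4 : v ∈ group2 <;>
    simp [ncKey, ncMask, h1, h2, h3, h4, Prod.ext_iff]

theorem neighbor_count_spec : Claim_equal_neighbor_count := by
  intro c group1 group2 _
  show neighbor_count c group1 group2 = neighbor_count_alt c group1 group2
  unfold neighbor_count neighbor_count_alt
  dsimp only
  rw [hist_getD, hist_getD, hist_getD, hist_getD]
  simp only [PySem.Dict.getD_empty, zero_add]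
  -- A's counts fold as a sum of per-kv counts
  have hA1 : List.foldl
      (fun (acc : Int) (kv : String × List String) =>
        acc + (if kv.1 ∉ group1 then 0
               else kv.2.foldl (fun s v => s + (if v ∈ group2 then 1 else 0)) 0)) 0 c
      = (c.map (fun kv => ((kv.2.countP (fun v => decide (kv.1 ∈ group1 ∧ v ∈ group2)) : Nat) : Int))).sum := by
    have : ∀ kv : String × List String,
        (if kv.1 ∉ group1 then (0:Int)
         else kv.2.foldl (fun s v => s + (if v ∈ group2 then 1 else 0)) 0)
        = ((kv.2.countP (fun v => decide (kv.1 ∈ group1 ∧ v ∈ group2)) : Nat) : Int) := by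
      intro kv
      by_cases h : kv.1 ∈ group1
      · rw [if_neg (by simp [h])]
        rw [foldl_if_count (fun v => v ∈ group2), zero_add]
        congr 1
        apply List.countP_congr
        intro v _
        simp [h]
      · rw [if_pos (by simp [h])]
        have hz : kv.2.countP (fun v => decide (kv.1 ∈ group1 ∧ v ∈ group2)) = 0 := by
          apply List.countP_eq_zero.2
          intro v _
          simp [h]
        rw [hz]
        simp
    calc _ = List.foldl (fun (acc : Int) (kv : String × List String) =>
              acc + ((kv.2.countP (fun v => decide (kv.1 ∈ group1 ∧ v ∈ group2)) : Nat) : Int)) 0 c := by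
              apply PySem.List.foldl_congr_mem
              intro acc kv _
              rw [this kv]
      _ = _ := by rw [foldl_add_sum, zero_add]
  -- A's double fold as a sum of per-kv counts
  have hA2 : List.foldl
      (fun (acc : Int) (kv : String × List String) =>
        acc + kv.2.foldl
          (fun s v => s + (if kv.1 ∈ group1 ∧ kv.1 ∈ group2 ∧ v ∈ group1 ∧ v ∈ group2 then 1 else 0)) 0) 0 c
      = (c.map (fun kv => ((kv.2.countP (fun v => ncKey group1 group2 kv.1 v == (3, 3)) : Nat) : Int))).sum := by
    calc _ = List.foldl (fun (acc : Int) (kv : String × List String) =>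
              acc + ((kv.2.countP (fun v => ncKey group1 group2 kv.1 v == (3, 3)) : Nat) : Int)) 0 c := by
              apply PySem.List.foldl_congr_mem
              intro acc kv _
              rw [foldl_if_count (fun v => kv.1 ∈ group1 ∧ kv.1 ∈ group2 ∧ v ∈ group1 ∧ v ∈ group2),
                zero_add, countP_both]
      _ = _ := by rw [foldl_add_sum, zero_add]
  rw [hA1, hA2, sum_split]
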